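-- pv_equiv track=rewrite | github.com/yan-cedar/advent_of_code | 2024/Day5/day-5.py | build_update_fact
-- ===== SOURCE A (Python) =====
-- from collections import defaultdict
--
-- def build_update_fact(update_list):
--     order_facts = defaultdict(lambda: {'before': set(), 'after': set()})
--
--     for i, item in enumerate(update_list):
--         for j in range(i):
--             order_facts[item]['before'].add(update_list[j])
--         for j in range(i+1, len(update_list)):
--             order_facts[item]['after'].add(update_list[j])
--
--     return order_facts
-- ===== SOURCE B (Python) =====
-- from collections import defaultdict
--
-- def build_update_fact(update_list):
--     order_facts = defaultdict(lambda: {'before': set(), 'after': set()})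
--     first, last = {}, {}
--     for i, x in enumerate(update_list):
--         first.setdefault(x, i)
--         last[x] = i
--     for x in first:
--         order_facts[x]['before'] = set(update_list[:last[x]])
--         order_facts[x]['after'] = set(update_list[first[x] + 1:])
--     return order_facts
-- ===== Notes on version B (the rewrite author's own statement) =====
-- stated objective: alternative
-- what changed: A's nested index loops (for each position, re-adding the whole prefix and suffix element by element) are replaced by one linear pass recording each element's first and last occurrence index in two dicts, then one 'before'/'after' set built per distinct element from a single slice of the list.
-- intended difference: On one-element lists A's two inner loops are both empty, so A never touches the defaultdict and returns {}; B returns {x: {'before': set(), 'after': set()}}, recording the single element with empty before/after sets, which is the intended fact set. — e.g. on build_update_fact([0]): A returns [], B returns [(0, [("before", []), ("after", [])])]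
import Mathlib
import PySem

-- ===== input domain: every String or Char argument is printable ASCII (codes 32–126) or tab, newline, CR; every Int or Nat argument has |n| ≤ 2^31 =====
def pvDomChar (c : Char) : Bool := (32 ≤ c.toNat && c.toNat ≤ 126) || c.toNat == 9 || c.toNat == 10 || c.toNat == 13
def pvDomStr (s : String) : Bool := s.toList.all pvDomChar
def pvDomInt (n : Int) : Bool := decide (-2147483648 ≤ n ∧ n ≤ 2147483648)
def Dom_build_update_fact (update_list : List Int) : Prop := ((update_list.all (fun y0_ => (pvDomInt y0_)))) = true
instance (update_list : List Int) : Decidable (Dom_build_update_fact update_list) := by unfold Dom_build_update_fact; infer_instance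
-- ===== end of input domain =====

-- B replaces A's quadratic nested index loops by one pass recording first/last occurrence
-- indices and one slice-based set construction per distinct element (return value only;
-- both Pythons return a fresh defaultdict, no argument is mutated).

-- ===== PORT A =====
-- the defaultdict factory: lambda: {'before': set(), 'after': set()}
def pvDefaultFact : PySem.Dict String (PySem.Set Int) :=
  PySem.Dict.mk [("before", PySem.Set.empty), ("after", PySem.Set.empty)]

-- order_facts[item][key].add(v)  (re-insert models the in-place mutation)
def pvAdd1 (key : String) (item : Int)
    (d : PySem.Dict Int (PySem.Dict String (PySem.Set Int))) (v : Int) :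
    PySem.Dict Int (PySem.Dict String (PySem.Set Int)) :=
  let fact := d.getD item pvDefaultFact
  d.insert item (fact.insert key (PySem.Set.add (fact.getD key PySem.Set.empty) v))

-- the body of A's outer loop over enumerate(update_list)
def pvStepA (update_list : List Int)
    (d : PySem.Dict Int (PySem.Dict String (PySem.Set Int))) (p : Int × Int) :
    PySem.Dict Int (PySem.Dict String (PySem.Set Int)) :=
  let i := p.1
  let item := p.2
  let d := (PySem.List.pyRange 0 i).foldl
    (fun d j => pvAdd1 "before" item d (PySem.List.pyGetD update_list j 0)) d
  (PySem.List.pyRange (i + 1) (update_list.length : Int)).foldl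
    (fun d j => pvAdd1 "after" item d (PySem.List.pyGetD update_list j 0)) d

def build_update_fact (update_list : List Int) : List (Int × List (String × List Int)) :=
  let order_facts :=
    (PySem.List.enumerate update_list 0).foldl (pvStepA update_list) PySem.Dict.empty
  order_facts.items.map (fun q => (q.1, q.2.items))

-- ===== PORT B =====
def build_update_fact_alt (update_list : List Int) : List (Int × List (String × List Int)) :=
  let fl := (PySem.List.enumerate update_list 0).foldl
    (fun (fl : PySem.Dict Int Int × PySem.Dict Int Int) p =>
      (fl.1.setdefault p.2 p.1, fl.2.insert p.2 p.1))
    (PySem.Dict.empty, PySem.Dict.empty)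
  let first := fl.1
  let last := fl.2
  let order_facts : PySem.Dict Int (PySem.Dict String (PySem.Set Int)) :=
    first.keys.foldl
      (fun d x =>
        let fact := d.getD x pvDefaultFact
        let fact := fact.insert "before"
          (PySem.Set.ofList (PySem.List.slice update_list none (some (last.getD x 0))))
        let fact := fact.insert "after"
          (PySem.Set.ofList (PySem.List.slice update_list (some (first.getD x 0 + 1)) none))
        d.insert x fact)
      PySem.Dict.empty
  order_facts.items.map (fun q => (q.1, q.2.items))

-- ===== PRECONDITION & SPEC =====
-- On one-element lists A's inner loops are both empty, so A never touches the defaultdict and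
-- returns {}; B returns the intended fact set {x: {'before': set(), 'after': set()}} recording
-- the single element with empty before/after sets.
def D_build_update_fact (update_list : List Int) : Prop := update_list.length = 1
instance (update_list : List Int) : Decidable (D_build_update_fact update_list) := by
  unfold D_build_update_fact; infer_instance

def Spec_build_update_fact (update_list : List Int) (out : List (Int × List (String × List Int))) : Prop :=
  ¬ D_build_update_fact update_list → out = build_update_fact_alt update_list
instance (update_list : List Int) (out : List (Int × List (String × List Int))) : Decidable (Spec_build_update_fact update_list out) := by
  unfold Spec_build_update_fact; infer_instance

def pvDiffWitness_build_update_fact : List Int := [0]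
def pvDiffWitnessOut_build_update_fact :
    (List (Int × List (String × List Int))) × (List (Int × List (String × List Int))) :=
  ([], [(0, [("before", []), ("after", [])])])

-- ===== CLAIM (what is proved, stated in full; the proofs are below) =====
def Claim_unchanged_build_update_fact : Prop := ∀ (update_list : List Int), Dom_build_update_fact update_list → Spec_build_update_fact update_list (build_update_fact update_list)
def Claim_changed_build_update_fact : Prop := Dom_build_update_fact (pvDiffWitness_build_update_fact) ∧ D_build_update_fact (pvDiffWitness_build_update_fact) ∧ build_update_fact (pvDiffWitness_build_update_fact) = pvDiffWitnessOut_build_update_fact.1 ∧ build_update_fact_alt (pvDiffWitness_build_update_fact) = pvDiffWitnessOut_build_update_fact.2 ∧ pvDiffWitnessOut_build_update_fact.1 ≠ pvDiffWitnessOut_build_update_fact.2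
def Claim_exact_build_update_fact : Prop := ∀ (update_list : List Int), Dom_build_update_fact update_list → D_build_update_fact update_list → build_update_fact update_list ≠ build_update_fact_alt update_list

-- ===== LEMMAS AND PROOFS =====

-- first-occurrence index (meaningful when x ∈ l)
def pvFidx : List Int → Int → Nat
  | [], _ => 0
  | y :: ys, x => if y = x then 0 else pvFidx ys x + 1

-- last-occurrence index (meaningful when x ∈ l)
def pvLidx : List Int → Int → Nat
  | [], _ => 0
  | _ :: ys, x => if x ∈ ys then pvLidx ys x + 1 else 0

-- the inner dict both programs end up storing for a key with last index t and first index f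
def pvEntry (l : List Int) (f t : Nat) : PySem.Dict String (PySem.Set Int) :=
  PySem.Dict.mk [("before", PySem.Set.ofList (l.take t)),
                 ("after", PySem.Set.ofList (l.drop (f + 1)))]

-- a dict whose items are ks.map (fun y => (y, g y))
def pvMapD {ν : Type} (ks : List Int) (g : Int → ν) : PySem.Dict Int ν :=
  PySem.Dict.mk (ks.map (fun y => (y, g y)))

lemma pvMapD_keys {ν : Type} (ks : List Int) (g : Int → ν) : (pvMapD ks g).keys = ks := by
  simp [pvMapD, PySem.Dict.keys_mk, List.map_map, Function.comp_def]

lemma pvMapD_contains {ν : Type} (ks : List Int) (g : Int → ν) (x : Int) :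
    (pvMapD ks g).contains x = decide (x ∈ ks) := by
  rw [PySem.Dict.contains_eq_decide_mem_keys, pvMapD_keys]

lemma pvMapD_getD {ν : Type} (ks : List Int) (g : Int → ν) (x : Int) (dflt : ν)
    (hx : x ∈ ks) (hnd : ks.Nodup) : (pvMapD ks g).getD x dflt = g x := by
  refine PySem.Dict.getD_of_mem_items _ ?_ ?_ dflt
  · exact List.mem_map.mpr ⟨x, hx, rfl⟩
  · rw [pvMapD_keys]; exact hnd

lemma pvMapD_getD_not {ν : Type} (ks : List Int) (g : Int → ν) (x : Int) (dflt : ν)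
    (hx : x ∉ ks) : (pvMapD ks g).getD x dflt = dflt := by
  refine PySem.Dict.getD_of_not_contains _ _ ?_
  rw [pvMapD_contains]; simpa using hx

lemma pvMapD_congr {ν : Type} (ks : List Int) (g g' : Int → ν)
    (h : ∀ y ∈ ks, g y = g' y) : pvMapD ks g = pvMapD ks g' := by
  unfold pvMapD
  congr 1
  exact List.map_congr_left (fun y hy => by rw [h y hy])

lemma pvMapD_insert_not_mem {ν : Type} (ks : List Int) (g : Int → ν) (x : Int) (v : ν)
    (hx : x ∉ ks) (g' : Int → ν) (hg : ∀ y ∈ ks, g' y = g y) (hgx : g' x = v) :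
    (pvMapD ks g).insert x v = pvMapD (ks ++ [x]) g' := by
  apply PySem.Dict.ext
  rw [PySem.Dict.items_insert_of_not_contains _ _ (by rw [pvMapD_contains]; simpa using hx)]
  show (ks.map (fun y => (y, g y))) ++ [(x, v)] = (ks ++ [x]).map (fun y => (y, g' y))
  rw [List.map_append]
  congr 1
  · exact List.map_congr_left (fun y hy => by rw [hg y hy])
  · simp [hgx]

lemma pvMapD_insert_mem {ν : Type} (ks : List Int) (g : Int → ν) (x : Int) (v : ν)
    (hx : x ∈ ks) :
    (pvMapD ks g).insert x v = pvMapD ks (fun y => if y = x then v else g y) := by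
  apply PySem.Dict.ext
  rw [PySem.Dict.items_insert_of_contains _ _ (by rw [pvMapD_contains]; simpa using hx)]
  show List.map _ (ks.map (fun y => (y, g y))) = _
  rw [List.map_map]
  apply List.map_congr_left
  intro y _
  by_cases hyx : y = x <;> simp [hyx]

-- pvFidx / pvLidx bookkeeping
lemma pvFidx_append_mem (pre l' : List Int) (x : Int) (hx : x ∈ pre) :
    pvFidx (pre ++ l') x = pvFidx pre x := by
  induction pre with
  | nil => cases hx
  | cons y ys ih =>
    by_cases hyx : y = x
    · simp [pvFidx, hyx]
    · have : x ∈ ys := by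
        rcases List.mem_cons.mp hx with h | h
        · exact absurd h.symm hyx
        · exact h
      simp [pvFidx, hyx, ih this]

lemma pvFidx_append_self (pre l' : List Int) (x : Int) (hx : x ∉ pre) :
    pvFidx (pre ++ x :: l') x = pre.length := by
  induction pre with
  | nil => simp [pvFidx]
  | cons y ys ih =>
    have hyx : y ≠ x := fun h => hx (by simp [h])
    have : x ∉ ys := fun h => hx (by simp [h])
    simp [pvFidx, hyx, ih this]

lemma pvLidx_append_ne (pre : List Int) (x z : Int) (hxz : x ≠ z) :
    pvLidx (pre ++ [z]) x = pvLidx pre x := by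
  induction pre with
  | nil => simp [pvLidx]
  | cons y ys ih =>
    by_cases hmem : x ∈ ys
    · simp [pvLidx, hmem, List.mem_append, hxz, ih]
    · simp [pvLidx, hmem, List.mem_append, hxz]

lemma pvLidx_append_self (pre : List Int) (z : Int) :
    pvLidx (pre ++ [z]) z = pre.length := by
  induction pre with
  | nil => simp [pvLidx]
  | cons y ys ih => simp [pvLidx, ih]

lemma pvFidx_lt_length (l : List Int) (x : Int) (hx : x ∈ l) : pvFidx l x < l.length := by
  induction l with
  | nil => cases hx
  | cons y ys ih =>
    by_cases hyx : y = x
    · simp [pvFidx, hyx]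
    · have : x ∈ ys := by
        rcases List.mem_cons.mp hx with h | h
        · exact absurd h.symm hyx
        · exact h
      simpa [pvFidx, hyx] using ih this

lemma pvLidx_lt_length (l : List Int) (x : Int) (hx : x ∈ l) : pvLidx l x < l.length := by
  induction l with
  | nil => cases hx
  | cons y ys ih =>
    by_cases hmem : x ∈ ys
    · simpa [pvLidx, hmem] using ih hmem
    · simp [pvLidx, hmem]

-- Set helpers
lemma pvSet_update_mem (s : PySem.Set Int) (vs : List Int) (h : ∀ a ∈ vs, a ∈ s) :
    PySem.Set.update s vs = s := by
  induction vs generalizing s with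
  | nil => exact PySem.Set.update_nil s
  | cons v vs' ih =>
    rw [PySem.Set.update_cons, PySem.Set.add_of_mem (h v (by simp))]
    exact ih s (fun a ha => h a (by simp [ha]))

lemma pvUpdate_take (l : List Int) (t i : Nat) (hti : t ≤ i) :
    PySem.Set.update (PySem.Set.ofList (l.take t)) (l.take i) = PySem.Set.ofList (l.take i) := by
  have hsplit : l.take i = l.take t ++ (l.drop t).take (i - t) := by
    rw [← List.take_add, Nat.add_sub_cancel' hti]
  rw [hsplit, PySem.Set.update_append,
    pvSet_update_mem _ _ (fun a ha => (PySem.Set.mem_ofList _ a).mpr ha),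
    ← PySem.Set.ofList_append]

lemma pvUpdate_drop (l : List Int) (f i : Nat) (hfi : f ≤ i) :
    PySem.Set.update (PySem.Set.ofList (l.drop f)) (l.drop i) = PySem.Set.ofList (l.drop f) := by
  refine pvSet_update_mem _ _ (fun a ha => ?_)
  rw [PySem.Set.mem_ofList]
  have : l.drop i = (l.drop f).drop (i - f) := by
    rw [List.drop_drop, Nat.add_sub_cancel' hfi]
  rw [this] at ha
  exact List.drop_subset _ _ ha

-- dedup append
lemma pvDedup_append (pre : List Int) (x : Int) :
    PySem.List.dedup (pre ++ [x]) =
      if x ∈ pre then PySem.List.dedup pre else PySem.List.dedup pre ++ [x] := by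
  rw [PySem.List.dedup_eq_ofList, PySem.List.dedup_eq_ofList, PySem.Set.ofList_append]
  show (PySem.Set.ofList pre).update [x] = _
  rw [PySem.Set.update_cons, PySem.Set.update_nil]
  by_cases hx : x ∈ pre
  · rw [PySem.Set.add_of_mem ((PySem.Set.mem_ofList _ _).mpr hx)]; simp [hx]
  · rw [PySem.Set.add_of_not_mem (fun h => hx ((PySem.Set.mem_ofList _ _).mp h))]; simp [hx]

-- literal inner-dict computations
lemma pvFact_insert_before (b a b' : PySem.Set Int) :
    (PySem.Dict.mk [("before", b), ("after", a)]).insert "before" b' =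
      PySem.Dict.mk [("before", b'), ("after", a)] := rfl

lemma pvFact_insert_after (b a a' : PySem.Set Int) :
    (PySem.Dict.mk [("before", b), ("after", a)]).insert "after" a' =
      PySem.Dict.mk [("before", b), ("after", a')] := rfl

lemma pvFact_getD_before (b a : PySem.Set Int) :
    (PySem.Dict.mk [("before", b), ("after", a)]).getD "before" PySem.Set.empty = b := rfl

lemma pvFact_getD_after (b a : PySem.Set Int) :
    (PySem.Dict.mk [("before", b), ("after", a)]).getD "after" PySem.Set.empty = a := rfl

-- range→values lemmas
lemma pvRange_nil (a b : Int) (h : b ≤ a) : PySem.List.pyRange a b = [] := by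
  rw [List.eq_nil_iff_forall_not_mem]
  intro x hx
  rw [PySem.List.mem_pyRange_one] at hx
  omega

lemma pvGet_nat (l : List Int) (s : Nat) (h : s < l.length) :
    PySem.List.pyGetD l ((s : Nat) : Int) 0 = l[s]'h := by
  rw [PySem.List.pyGetD_eq_getElem l 0 (by positivity) (by exact_mod_cast h)]
  simp

lemma pvMap_range_take (l : List Int) (s : Nat) (hs : s ≤ l.length) :
    (PySem.List.pyRange 0 (s : Int)).map (fun j => PySem.List.pyGetD l j 0) = l.take s := by
  induction s with
  | zero => simp [pvRange_nil 0 0 le_rfl]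
  | succ s ih =>
    have hs' : s ≤ l.length := Nat.le_of_succ_le hs
    have hsplit : PySem.List.pyRange 0 ((s + 1 : Nat) : Int) =
        PySem.List.pyRange 0 (s : Int) ++ [(s : Int)] := by
      have h := PySem.List.pyRange_one_succ_right (a := (0 : Int)) (b := (s : Int)) (by positivity)
      push_cast
      exact h
    rw [hsplit, List.map_append, ih hs', List.map_cons, List.map_nil,
      pvGet_nat l s (by omega), List.take_add_one, List.getElem?_eq_getElem (by omega)]
    rfl

lemma pvMap_range_drop_aux (l : List Int) :
    ∀ (k s : Nat), l.length - s = k →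
      (PySem.List.pyRange (s : Int) (l.length : Int)).map (fun j => PySem.List.pyGetD l j 0) =
        l.drop s := by
  intro k
  induction k with
  | zero =>
    intro s hk
    rw [pvRange_nil _ _ (by exact_mod_cast (by omega : l.length ≤ s)), List.map_nil,
      List.drop_eq_nil_of_le (by omega)]
  | succ k ih =>
    intro s hk
    have h : s < l.length := by omega
    rw [PySem.List.pyRange_one_cons (by exact_mod_cast h), List.map_cons, pvGet_nat l s h,
      show ((s : Int) + 1) = ((s + 1 : Nat) : Int) by push_cast; ring, ih (s + 1) (by omega)]
    exact (List.drop_eq_getElem_cons h).symm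

lemma pvMap_range_drop (l : List Int) (s : Nat) :
    (PySem.List.pyRange (s : Int) (l.length : Int)).map (fun j => PySem.List.pyGetD l j 0) =
      l.drop s :=
  pvMap_range_drop_aux l (l.length - s) s rfl

-- A's inner loop over a nonempty value list
lemma pvFoldl_pvAdd1 (key : String) (item : Int) (vs : List Int)
    (d : PySem.Dict Int (PySem.Dict String (PySem.Set Int))) (hvs : vs ≠ []) :
    vs.foldl (pvAdd1 key item) d =
      d.insert item ((d.getD item pvDefaultFact).insert key
        (PySem.Set.update ((d.getD item pvDefaultFact).getD key PySem.Set.empty) vs)) := by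
  induction vs generalizing d with
  | nil => exact absurd rfl hvs
  | cons v vs' ih =>
    rw [List.foldl_cons]
    by_cases hnil : vs' = []
    · subst hnil
      simp only [List.foldl_nil, pvAdd1, PySem.Set.update_cons, PySem.Set.update_nil]
    · rw [ih _ hnil]
      simp only [pvAdd1, PySem.Dict.getD_insert_self, PySem.Dict.insert_insert_self,
        PySem.Set.update_cons]

-- the main invariant for A's outer loop (needs at least two elements so every
-- iteration touches the defaultdict)
lemma pvA_inv (l : List Int) (hl : 2 ≤ l.length) :
    ∀ (rest pre : List Int), l = pre ++ rest →
      (PySem.List.enumerate rest (pre.length : Int)).foldl (pvStepA l)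
        (pvMapD (PySem.List.dedup pre) (fun y => pvEntry l (pvFidx l y) (pvLidx pre y))) =
      pvMapD (PySem.List.dedup l) (fun y => pvEntry l (pvFidx l y) (pvLidx l y)) := by
  intro rest
  induction rest with
  | nil =>
    intro pre hpre
    simp only [List.append_nil] at hpre
    subst hpre
    rfl
  | cons x rest' ih =>
    intro pre hpre
    have hlen : pre.length < l.length := by
      rw [hpre, List.length_append, List.length_cons]; omega
    rw [PySem.List.enumerate_cons, List.foldl_cons]
    have hstep : pvStepA l
        (pvMapD (PySem.List.dedup pre) (fun y => pvEntry l (pvFidx l y) (pvLidx pre y)))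
        ((pre.length : Int), x) =
        pvMapD (PySem.List.dedup (pre ++ [x]))
          (fun y => pvEntry l (pvFidx l y) (pvLidx (pre ++ [x]) y)) := by
      set d := pvMapD (PySem.List.dedup pre) (fun y => pvEntry l (pvFidx l y) (pvLidx pre y)) with hd
      have hsle : pre.length ≤ l.length := Nat.le_of_lt hlen
      -- the two inner loops, rewritten as folds over the value lists
      have hb : (PySem.List.pyRange 0 ((pre.length : Nat) : Int)).foldl
          (fun d j => pvAdd1 "before" x d (PySem.List.pyGetD l j 0)) d =
          (l.take pre.length).foldl (pvAdd1 "before" x) d := by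
        rw [← pvMap_range_take l pre.length hsle, List.foldl_map]
      have ha : ∀ d' : PySem.Dict Int (PySem.Dict String (PySem.Set Int)),
          (PySem.List.pyRange (((pre.length : Nat) : Int) + 1) (l.length : Int)).foldl
            (fun d j => pvAdd1 "after" x d (PySem.List.pyGetD l j 0)) d' =
          (l.drop (pre.length + 1)).foldl (pvAdd1 "after" x) d' := by
        intro d'
        rw [show (((pre.length : Nat) : Int) + 1) = ((pre.length + 1 : Nat) : Int) by
              push_cast; ring,
          ← pvMap_range_drop l (pre.length + 1), List.foldl_map]
      have htake : l.take pre.length = pre := by rw [hpre]; exact List.take_left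
      have hdrop : l.drop (pre.length + 1) = rest' := by
        rw [hpre, show pre ++ x :: rest' = (pre ++ [x]) ++ rest' by simp,
          show pre.length + 1 = (pre ++ [x]).length by simp]
        exact List.drop_left
      show (PySem.List.pyRange (((pre.length : Nat) : Int) + 1) (l.length : Int)).foldl
            (fun d j => pvAdd1 "after" x d (PySem.List.pyGetD l j 0))
            ((PySem.List.pyRange 0 ((pre.length : Nat) : Int)).foldl
              (fun d j => pvAdd1 "before" x d (PySem.List.pyGetD l j 0)) d) = _
      rw [hb, ha]
      -- the entry that x ends up with after this step
      have hentry : pvEntry l (pvFidx l x) (pvLidx (pre ++ [x]) x) =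
          PySem.Dict.mk [("before", PySem.Set.ofList (l.take pre.length)),
            ("after", PySem.Set.ofList (l.drop (pvFidx l x + 1)))] := by
        unfold pvEntry
        rw [pvLidx_append_self]
      by_cases hxpre : x ∈ pre
      · -- x already has an entry
        have hfact : d.getD x pvDefaultFact = pvEntry l (pvFidx l x) (pvLidx pre x) :=
          pvMapD_getD _ _ _ _ ((PySem.List.mem_dedup pre x).mpr hxpre) (PySem.List.nodup_dedup pre)
        have htne : l.take pre.length ≠ [] := by
          rw [htake]; rintro rfl; cases hxpre
        have hfxs : pvFidx l x < pre.length := by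
          rw [hpre, pvFidx_append_mem pre _ x hxpre]
          exact pvFidx_lt_length pre x hxpre
        have hfb : (l.take pre.length).foldl (pvAdd1 "before" x) d =
            d.insert x (pvEntry l (pvFidx l x) (pvLidx (pre ++ [x]) x)) := by
          rw [pvFoldl_pvAdd1 _ _ _ _ htne, hfact, hentry]
          unfold pvEntry
          rw [pvFact_getD_before, pvFact_insert_before,
            pvUpdate_take l _ _ (Nat.le_of_lt (pvLidx_lt_length pre x hxpre))]
        rw [hfb]
        have hfa : (l.drop (pre.length + 1)).foldl (pvAdd1 "after" x)
            (d.insert x (pvEntry l (pvFidx l x) (pvLidx (pre ++ [x]) x))) =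
            d.insert x (pvEntry l (pvFidx l x) (pvLidx (pre ++ [x]) x)) := by
          by_cases hrn : l.drop (pre.length + 1) = []
          · rw [hrn, List.foldl_nil]
          · rw [pvFoldl_pvAdd1 _ _ _ _ hrn, PySem.Dict.getD_insert_self, hentry,
              pvFact_getD_after, pvFact_insert_after,
              pvUpdate_drop l _ _ (by omega : pvFidx l x + 1 ≤ pre.length + 1),
              PySem.Dict.insert_insert_self, ← hentry]
        rw [hfa, hd, pvDedup_append, if_pos hxpre,
          pvMapD_insert_mem _ _ _ _ ((PySem.List.mem_dedup pre x).mpr hxpre)]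
        apply pvMapD_congr
        intro y hy
        beta_reduce
        by_cases hyx : y = x
        · simp [hyx]
        · rw [if_neg hyx, pvLidx_append_ne pre y x hyx]
      · -- x is new
        have hfact : d.getD x pvDefaultFact = pvDefaultFact :=
          pvMapD_getD_not _ _ _ _ (fun h => hxpre ((PySem.List.mem_dedup pre x).mp h))
        have hfx : pvFidx l x = pre.length := by
          rw [hpre]; exact pvFidx_append_self pre rest' x hxpre
        have hentry' : pvEntry l (pvFidx l x) (pvLidx (pre ++ [x]) x) =
            PySem.Dict.mk [("before", PySem.Set.ofList (l.take pre.length)),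
              ("after", PySem.Set.ofList (l.drop (pre.length + 1)))] := by
          rw [hentry, hfx]
        have hone : d.insert x (pvEntry l (pvFidx l x) (pvLidx (pre ++ [x]) x)) =
            pvMapD (PySem.List.dedup (pre ++ [x]))
              (fun y => pvEntry l (pvFidx l y) (pvLidx (pre ++ [x]) y)) := by
          rw [hd, pvMapD_insert_not_mem _ _ x _
            (fun h => hxpre ((PySem.List.mem_dedup pre x).mp h))
            (fun y => pvEntry l (pvFidx l y) (pvLidx (pre ++ [x]) y))
            (fun y hy => by
              beta_reduce
              have hypre : y ∈ pre := (PySem.List.mem_dedup pre y).mp hy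
              rw [pvLidx_append_ne pre y x (fun h => hxpre (h ▸ hypre))])
            rfl, pvDedup_append, if_neg hxpre]
        by_cases hprene : pre = []
        · -- first iteration: the before loop is empty, the after loop is not
          have htn : l.take pre.length = [] := by rw [hprene]; rfl
          have hrne : l.drop (pre.length + 1) ≠ [] := by
            intro hcon
            have := congrArg List.length hcon
            rw [List.length_drop, hprene] at this
            simp at this
            omega
          rw [htn, List.foldl_nil, pvFoldl_pvAdd1 _ _ _ _ hrne, hfact]
          show d.insert x ((PySem.Dict.mk [("before", PySem.Set.empty), ("after", PySem.Set.empty)]).insert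
              "after" (PySem.Set.update PySem.Set.empty (l.drop (pre.length + 1)))) = _
          rw [pvFact_insert_after, PySem.Set.update_empty, ← hone, hentry', hprene]
          show d.insert x (PySem.Dict.mk [("before", PySem.Set.ofList []), _]) =
            d.insert x (PySem.Dict.mk [("before", PySem.Set.ofList (l.take 0)), _])
          rw [List.take_zero]
        · -- x new, pre nonempty: both loops run (the after loop possibly empty)
          have htne : l.take pre.length ≠ [] := by
            rw [htake]; exact hprene
          have hfb : (l.take pre.length).foldl (pvAdd1 "before" x) d =
              d.insert x (PySem.Dict.mk [("before", PySem.Set.ofList (l.take pre.length)),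
                ("after", PySem.Set.empty)]) := by
            rw [pvFoldl_pvAdd1 _ _ _ _ htne, hfact]
            show d.insert x ((PySem.Dict.mk [("before", PySem.Set.empty), ("after", PySem.Set.empty)]).insert
                "before" (PySem.Set.update PySem.Set.empty (l.take pre.length))) = _
            rw [pvFact_insert_before, PySem.Set.update_empty]
          rw [hfb]
          have hfa : (l.drop (pre.length + 1)).foldl (pvAdd1 "after" x)
              (d.insert x (PySem.Dict.mk [("before", PySem.Set.ofList (l.take pre.length)),
                ("after", PySem.Set.empty)])) =
              d.insert x (PySem.Dict.mk [("before", PySem.Set.ofList (l.take pre.length)),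
                ("after", PySem.Set.ofList (l.drop (pre.length + 1)))]) := by
            by_cases hrn : l.drop (pre.length + 1) = []
            · rw [hrn, List.foldl_nil]
              congr 2
            · rw [pvFoldl_pvAdd1 _ _ _ _ hrn, PySem.Dict.getD_insert_self,
                pvFact_getD_after, pvFact_insert_after, PySem.Set.update_empty,
                PySem.Dict.insert_insert_self]
          rw [hfa, ← hentry', hone]
    rw [hstep]
    have hcast : ((pre.length : Int) + 1) = (((pre ++ [x]).length : Nat) : Int) := by
      simp
    rw [hcast]
    exact ih (pre ++ [x]) (by simp [hpre])

-- B's first/last index dicts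
lemma pvFirst_inv (l : List Int) :
    ∀ (rest pre : List Int), l = pre ++ rest →
      (PySem.List.enumerate rest (pre.length : Int)).foldl
        (fun (d : PySem.Dict Int Int) (p : Int × Int) => d.setdefault p.2 p.1)
        (pvMapD (PySem.List.dedup pre) (fun y => (pvFidx l y : Int))) =
      pvMapD (PySem.List.dedup l) (fun y => (pvFidx l y : Int)) := by
  intro rest
  induction rest with
  | nil =>
    intro pre hpre
    simp only [List.append_nil] at hpre
    subst hpre
    rfl
  | cons x rest' ih =>
    intro pre hpre
    rw [PySem.List.enumerate_cons, List.foldl_cons]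
    have hstep : (pvMapD (PySem.List.dedup pre) (fun y => (pvFidx l y : Int))).setdefault x
        (pre.length : Int) =
        pvMapD (PySem.List.dedup (pre ++ [x])) (fun y => (pvFidx l y : Int)) := by
      by_cases hxpre : x ∈ pre
      · rw [PySem.Dict.setdefault_of_contains _ _
          (by rw [pvMapD_contains]; simp [hxpre]),
          pvDedup_append, if_pos hxpre]
      · rw [PySem.Dict.setdefault_of_not_contains _ _
          (by rw [pvMapD_contains]; simp [hxpre]),
          pvMapD_insert_not_mem _ _ x _
            (fun h => hxpre ((PySem.List.mem_dedup pre x).mp h))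
            (fun y => (pvFidx l y : Int)) (fun y _ => rfl)
            (by beta_reduce; rw [hpre, pvFidx_append_self pre rest' x hxpre]),
          pvDedup_append, if_neg hxpre]
    rw [hstep, show ((pre.length : Int) + 1) = (((pre ++ [x]).length : Nat) : Int) by simp]
    exact ih (pre ++ [x]) (by simp [hpre])

lemma pvLast_inv (l : List Int) :
    ∀ (rest pre : List Int), l = pre ++ rest →
      (PySem.List.enumerate rest (pre.length : Int)).foldl
        (fun (d : PySem.Dict Int Int) (p : Int × Int) => d.insert p.2 p.1)
        (pvMapD (PySem.List.dedup pre) (fun y => (pvLidx pre y : Int))) =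
      pvMapD (PySem.List.dedup l) (fun y => (pvLidx l y : Int)) := by
  intro rest
  induction rest with
  | nil =>
    intro pre hpre
    simp only [List.append_nil] at hpre
    subst hpre
    rfl
  | cons x rest' ih =>
    intro pre hpre
    rw [PySem.List.enumerate_cons, List.foldl_cons]
    have hstep : (pvMapD (PySem.List.dedup pre) (fun y => (pvLidx pre y : Int))).insert x
        (pre.length : Int) =
        pvMapD (PySem.List.dedup (pre ++ [x])) (fun y => (pvLidx (pre ++ [x]) y : Int)) := by
      by_cases hxpre : x ∈ pre
      · rw [pvMapD_insert_mem _ _ _ _ ((PySem.List.mem_dedup pre x).mpr hxpre),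
          pvDedup_append, if_pos hxpre]
        apply pvMapD_congr
        intro y hy
        beta_reduce
        by_cases hyx : y = x
        · rw [if_pos hyx, hyx, pvLidx_append_self]
        · rw [if_neg hyx, pvLidx_append_ne pre y x hyx]
      · rw [pvMapD_insert_not_mem _ _ x _
            (fun h => hxpre ((PySem.List.mem_dedup pre x).mp h))
            (fun y => (pvLidx (pre ++ [x]) y : Int))
            (fun y hy => by
              beta_reduce
              have hypre : y ∈ pre := (PySem.List.mem_dedup pre y).mp hy
              rw [pvLidx_append_ne pre y x (fun h => hxpre (h ▸ hypre))])
            (by beta_reduce; rw [pvLidx_append_self]),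
          pvDedup_append, if_neg hxpre]
    rw [hstep, show ((pre.length : Int) + 1) = (((pre ++ [x]).length : Nat) : Int) by simp]
    exact ih (pre ++ [x]) (by simp [hpre])

-- B's build loop over distinct keys appends one entry per key
lemma pvB_build (bv av : Int → PySem.Set Int) :
    ∀ (ks : List Int) (d : PySem.Dict Int (PySem.Dict String (PySem.Set Int))),
      ks.Nodup → (∀ x ∈ ks, d.contains x = false) →
      (ks.foldl (fun d x =>
          d.insert x (((d.getD x pvDefaultFact).insert "before" (bv x)).insert "after" (av x))) d).items =
        d.items ++ ks.map (fun x => (x, PySem.Dict.mk [("before", bv x), ("after", av x)])) := by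
  intro ks
  induction ks with
  | nil => intro d _ _; simp
  | cons x ks' ih =>
    intro d hnd hfresh
    rw [List.foldl_cons]
    have hget : d.getD x pvDefaultFact = pvDefaultFact :=
      PySem.Dict.getD_of_not_contains _ _ (hfresh x (by simp))
    have hval : ((d.getD x pvDefaultFact).insert "before" (bv x)).insert "after" (av x) =
        PySem.Dict.mk [("before", bv x), ("after", av x)] := by
      rw [hget]; rfl
    rw [hval]
    have hnd' : ks'.Nodup := (List.nodup_cons.mp hnd).2
    have hxks' : x ∉ ks' := (List.nodup_cons.mp hnd).1
    rw [ih _ hnd' (fun y hy => by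
      rw [PySem.Dict.contains_insert]
      have hyx : y ≠ x := fun h => hxks' (h ▸ hy)
      simp [hyx, hfresh y (by simp [hy])])]
    rw [PySem.Dict.items_insert_of_not_contains _ _ (hfresh x (by simp))]
    simp

-- the two ports produce the same dict items for every list (of length ≠ 1 this is
-- what the claim needs; the computation below covers all lengths ≥ 2 and 0)
lemma pvPorts_eq (l : List Int) (hl : l.length ≠ 1) :
    build_update_fact l = build_update_fact_alt l := by
  by_cases hnil : l = []
  · subst hnil; rfl
  · have hl2 : 2 ≤ l.length := by
      rcases l with _ | ⟨a, l'⟩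
      · exact absurd rfl hnil
      · simp only [List.length_cons] at hl ⊢
        omega
    -- A's side
    have hA : build_update_fact l =
        (pvMapD (PySem.List.dedup l) (fun y => pvEntry l (pvFidx l y) (pvLidx l y))).items.map
          (fun q => (q.1, q.2.items)) := by
      show ((PySem.List.enumerate l 0).foldl (pvStepA l) PySem.Dict.empty).items.map
          (fun q => (q.1, q.2.items)) = _
      have h0 : (PySem.Dict.empty : PySem.Dict Int (PySem.Dict String (PySem.Set Int))) =
          pvMapD (PySem.List.dedup ([] : List Int))
            (fun y => pvEntry l (pvFidx l y) (pvLidx [] y)) := rfl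
      rw [h0, show (0 : Int) = ((([] : List Int).length : Nat) : Int) by simp,
        pvA_inv l hl2 l [] rfl]
    -- B's side
    have hB : build_update_fact_alt l =
        (pvMapD (PySem.List.dedup l) (fun y => pvEntry l (pvFidx l y) (pvLidx l y))).items.map
          (fun q => (q.1, q.2.items)) := by
      simp only [build_update_fact_alt]
      rw [PySem.List.foldl_prod_mk (f := fun (d : PySem.Dict Int Int) (p : Int × Int) =>
            d.setdefault p.2 p.1)
          (g := fun (d : PySem.Dict Int Int) (p : Int × Int) => d.insert p.2 p.1)]
      have hfirst : (PySem.List.enumerate l 0).foldl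
          (fun (d : PySem.Dict Int Int) (p : Int × Int) => d.setdefault p.2 p.1)
          PySem.Dict.empty = pvMapD (PySem.List.dedup l) (fun y => (pvFidx l y : Int)) := by
        have h0 : (PySem.Dict.empty : PySem.Dict Int Int) =
            pvMapD (PySem.List.dedup ([] : List Int)) (fun y => (pvFidx l y : Int)) := rfl
        rw [h0, show (0 : Int) = ((([] : List Int).length : Nat) : Int) by simp,
          pvFirst_inv l l [] rfl]
      have hlast : (PySem.List.enumerate l 0).foldl
          (fun (d : PySem.Dict Int Int) (p : Int × Int) => d.insert p.2 p.1)
          PySem.Dict.empty = pvMapD (PySem.List.dedup l) (fun y => (pvLidx l y : Int)) := by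
        have h0 : (PySem.Dict.empty : PySem.Dict Int Int) =
            pvMapD (PySem.List.dedup ([] : List Int)) (fun y => (pvLidx ([] : List Int) y : Int)) := rfl
        rw [h0, show (0 : Int) = ((([] : List Int).length : Nat) : Int) by simp,
          pvLast_inv l l [] rfl]
      rw [hfirst, hlast, pvMapD_keys]
      have hitems := pvB_build
        (fun x => PySem.Set.ofList (PySem.List.slice l none
          (some ((pvMapD (PySem.List.dedup l) (fun y => (pvLidx l y : Int))).getD x 0))))
        (fun x => PySem.Set.ofList (PySem.List.slice l
          (some ((pvMapD (PySem.List.dedup l) (fun y => (pvFidx l y : Int))).getD x 0 + 1))))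
        (PySem.List.dedup l) PySem.Dict.empty (PySem.List.nodup_dedup l)
        (fun x _ => PySem.Dict.contains_empty x)
      rw [hitems]
      show List.map _ (List.map _ (PySem.List.dedup l)) = List.map _ (List.map _ (PySem.List.dedup l))
      rw [List.map_map, List.map_map]
      apply List.map_congr_left
      intro x hx
      have hgf : (pvMapD (PySem.List.dedup l) (fun y => (pvFidx l y : Int))).getD x 0 =
          (pvFidx l x : Int) := pvMapD_getD _ _ _ _ hx (PySem.List.nodup_dedup l)
      have hgl : (pvMapD (PySem.List.dedup l) (fun y => (pvLidx l y : Int))).getD x 0 =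
          (pvLidx l x : Int) := pvMapD_getD _ _ _ _ hx (PySem.List.nodup_dedup l)
      simp only [Function.comp_apply, hgf, hgl]
      rw [PySem.List.slice_to_natCast,
        show ((pvFidx l x : Int) + 1) = ((pvFidx l x + 1 : Nat) : Int) by push_cast; ring,
        PySem.List.slice_from_natCast]
      rfl
    rw [hA, hB]

-- the tight side: on one-element lists A returns [] and B returns one entry
lemma pvA_singleton (x : Int) : build_update_fact [x] = [] := rfl

lemma pvB_singleton (x : Int) :
    build_update_fact_alt [x] = [(x, [("before", []), ("after", [])])] := by
  simp only [build_update_fact_alt, PySem.List.enumerate_cons, PySem.List.enumerate_nil,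
    List.foldl_cons, List.foldl_nil]
  rw [PySem.Dict.setdefault_of_not_contains _ _ (PySem.Dict.contains_empty x)]
  rw [show ((PySem.Dict.empty : PySem.Dict Int Int).insert x 0).keys = [x] by
    apply PySem.Dict.keys_insert_of_not_contains
    exact PySem.Dict.contains_empty x]
  rw [List.foldl_cons, List.foldl_nil]
  have hget : (PySem.Dict.empty : PySem.Dict Int (PySem.Dict String (PySem.Set Int))).getD x
      pvDefaultFact = pvDefaultFact := PySem.Dict.getD_empty _ _
  have hlast : ((PySem.Dict.empty : PySem.Dict Int Int).insert x 0).getD x 0 = 0 :=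
    PySem.Dict.getD_insert_self _ _ _ _
  simp only [hget, hlast]
  rw [PySem.Dict.items_insert_of_not_contains _ _ (PySem.Dict.contains_empty x)]
  rfl

-- ===== VERDICT (by name: the statement is the Claim_ definition above) =====
theorem build_update_fact_spec : Claim_unchanged_build_update_fact := by
  intro l _ hD
  exact pvPorts_eq l hD

theorem build_update_fact_changed : Claim_changed_build_update_fact := by
  unfold Claim_changed_build_update_fact; decide

theorem build_update_fact_tight : Claim_exact_build_update_fact := by
  intro l _ hD
  unfold D_build_update_fact at hD
  rcases l with _ | ⟨x, l'⟩
  · simp at hD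
  · rcases l' with _ | ⟨y, l''⟩
    · rw [pvA_singleton, pvB_singleton]
      simp
    · simp at hD
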